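-- pv_equiv track=rewrite | github.com/TimCares/fairseq | examples/data2vec/models/mm_d2v.py | _get_pretrained_block_indices
-- ===== SOURCE A (Python) =====
-- from typing import List
--
-- def _get_pretrained_block_indices(depth, n_blocks_pretrained) -> List[int]:
--     blocks_pretrained = [i for i in range(n_blocks_pretrained)]
--     blocks = []
--     pretrained_blocks_count = len(blocks_pretrained)
--
--     if depth*2 > pretrained_blocks_count:
--         pretrained_remaining = pretrained_blocks_count
--         model_remaining = depth
--         current_block_idx = 0
--         while model_remaining*2 > pretrained_remaining and model_remaining > 0:
--             blocks.append(blocks_pretrained[current_block_idx])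
--             pretrained_remaining -= 1
--             model_remaining -= 1
--             current_block_idx += 1
--
--         if model_remaining > 0:
--             for i in range(0, depth-current_block_idx):
--                 take_block_idx = i*2+current_block_idx
--                 blocks.append(blocks_pretrained[take_block_idx])
--     else:
--         for i in range(depth):
--             blocks.append(blocks_pretrained[i*2])
--
--     assert len(blocks) == depth
--
--     return blocks
-- ===== SOURCE B (Python) =====
-- def _get_pretrained_block_indices(depth, n_blocks_pretrained):
--     # Closed-form per-position formula instead of A's two-phase greedy loop.
--     blocks_pretrained = [i for i in range(n_blocks_pretrained)]
--     s = max(0, 2 * depth - len(blocks_pretrained))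
--     blocks = []
--     for j in range(depth):
--         idx = j if j < s else 2 * j - s
--         blocks.append(blocks_pretrained[idx])
--     assert len(blocks) == depth
--     return blocks
-- ===== Notes on version B (the rewrite author's own statement) =====
-- stated objective: simpler
-- what changed: Replaced A's two-phase greedy construction (a while loop consuming remaining counters, then a stride-2 for loop from the stopping point) with a single loop using the closed-form index j if j < s else 2*j - s where s = max(0, 2*depth - n).
import Mathlib
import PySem

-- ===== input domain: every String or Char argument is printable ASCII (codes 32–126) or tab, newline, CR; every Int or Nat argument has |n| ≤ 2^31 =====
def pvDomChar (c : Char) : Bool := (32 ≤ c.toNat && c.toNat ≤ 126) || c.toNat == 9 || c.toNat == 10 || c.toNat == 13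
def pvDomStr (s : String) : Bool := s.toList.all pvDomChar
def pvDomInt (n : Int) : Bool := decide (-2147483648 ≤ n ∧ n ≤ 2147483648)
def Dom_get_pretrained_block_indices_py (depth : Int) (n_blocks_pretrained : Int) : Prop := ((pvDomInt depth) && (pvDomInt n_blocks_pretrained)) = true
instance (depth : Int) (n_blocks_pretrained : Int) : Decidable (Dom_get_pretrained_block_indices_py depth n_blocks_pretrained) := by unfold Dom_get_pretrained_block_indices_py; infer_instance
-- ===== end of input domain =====

-- B replaces A's two-phase greedy loop with a single closed-form per-position formula (objective: simpler).

-- ===== PORT A =====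
-- the while loop: state (pretrained_remaining, model_remaining, current_block_idx, blocks);
-- returns (blocks, model_remaining, current_block_idx).  Indexing uses pyGetD (in range under Pre_).
def pyAWhile (bp : List Int) (pr mr c : Int) (blocks : List Int) : List Int × Int × Int :=
  if mr * 2 > pr ∧ mr > 0 then
    pyAWhile bp (pr - 1) (mr - 1) (c + 1) (blocks ++ [PySem.List.pyGetD bp c 0])
  else (blocks, mr, c)
termination_by mr.toNat
decreasing_by omega

def get_pretrained_block_indices_py (depth : Int) (n_blocks_pretrained : Int) : List Int :=
  let bp := PySem.List.pyRange 0 n_blocks_pretrained 1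
  let cnt : Int := bp.length
  -- the final 'assert len(blocks) == depth' raises only outside Pre_; the port returns the list as built
  if depth * 2 > cnt then
    let r := pyAWhile bp cnt depth 0 []
    let blocks := r.1; let mr := r.2.1; let c := r.2.2
    if mr > 0 then
      (PySem.List.pyRange 0 (depth - c) 1).foldl
        (fun b i => b ++ [PySem.List.pyGetD bp (i * 2 + c) 0]) blocks
    else blocks
  else
    (PySem.List.pyRange 0 depth 1).foldl
      (fun b i => b ++ [PySem.List.pyGetD bp (i * 2) 0]) []

-- ===== PORT B =====
def get_pretrained_block_indices_py_alt (depth : Int) (n_blocks_pretrained : Int) : List Int :=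
  let bp := PySem.List.pyRange 0 n_blocks_pretrained 1
  let s := max 0 (2 * depth - (bp.length : Int))
  (PySem.List.pyRange 0 depth 1).foldl
    (fun b j => b ++ [PySem.List.pyGetD bp (if j < s then j else 2 * j - s) 0]) []

-- ===== PRECONDITION & SPEC =====
-- Pre_ excludes exactly the inputs where Python A raises: depth < 0 (AssertionError) and
-- 0 < depth with n_blocks_pretrained < depth (IndexError).
def Pre_get_pretrained_block_indices_py (depth : Int) (n_blocks_pretrained : Int) : Prop :=
  0 ≤ depth ∧ (depth ≤ n_blocks_pretrained ∨ depth = 0)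
instance (depth : Int) (n_blocks_pretrained : Int) : Decidable (Pre_get_pretrained_block_indices_py depth n_blocks_pretrained) := by unfold Pre_get_pretrained_block_indices_py; infer_instance

def pvWitness_get_pretrained_block_indices_py : Int × Int := (5, 12)

def Spec_get_pretrained_block_indices_py (depth : Int) (n_blocks_pretrained : Int) (out : List Int) : Prop := out = get_pretrained_block_indices_py_alt depth n_blocks_pretrained
instance (depth : Int) (n_blocks_pretrained : Int) (out : List Int) : Decidable (Spec_get_pretrained_block_indices_py depth n_blocks_pretrained out) := by unfold Spec_get_pretrained_block_indices_py; infer_instance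

-- ===== CLAIM (what is proved, stated in full; the proofs are below) =====
def Claim_equal_get_pretrained_block_indices_py : Prop := ∀ (depth : Int) (n_blocks_pretrained : Int), Dom_get_pretrained_block_indices_py depth n_blocks_pretrained → Pre_get_pretrained_block_indices_py depth n_blocks_pretrained → Spec_get_pretrained_block_indices_py depth n_blocks_pretrained (get_pretrained_block_indices_py depth n_blocks_pretrained)

-- ===== LEMMAS AND PROOFS =====

theorem pyAWhile_eq (bp : List Int) :
    ∀ (t : Nat) (P M c : Int) (blocks : List Int),
      (↑t : Int) = max 0 (min (2 * M - P) M) →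
      pyAWhile bp P M c blocks =
        (blocks ++ (List.range t).map (fun j => PySem.List.pyGetD bp (c + ↑j) 0),
         M - ↑t, c + ↑t) := by
  intro t
  induction t with
  | zero =>
    intro P M c blocks h
    rw [pyAWhile]
    rw [if_neg (by omega)]
    simp
  | succ t ih =>
    intro P M c blocks h
    rw [pyAWhile]
    rw [if_pos (by omega)]
    rw [ih (P - 1) (M - 1) (c + 1) _ (by omega)]
    simp only [Prod.mk.injEq]
    refine ⟨?_, by push_cast; ring_nf, by push_cast; ring_nf⟩
    simp only [List.range_succ_eq_map, List.map_cons, List.map_map, List.append_assoc,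
      List.cons_append, List.nil_append, Nat.cast_zero, add_zero]
    congr 1
    congr 1
    apply List.map_congr_left
    intro a _
    congr 1
    push_cast
    ring

theorem getD_pyRange_self (n i : Int) (h0 : 0 ≤ i) (h1 : i < n) :
    PySem.List.pyGetD (PySem.List.pyRange 0 n 1) i 0 = i := by
  have hlen : ((PySem.List.pyRange 0 n 1).length : Int) = n := by
    rw [PySem.List.length_pyRange_one]; omega
  rw [PySem.List.pyGetD_eq_getElem _ _ h0 (by omega)]
  rw [PySem.List.getElem_pyRange_one]
  omega

theorem alt_eq_map (depth n : Int) (h0 : 0 ≤ depth) (h1 : depth ≤ n) :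
    get_pretrained_block_indices_py_alt depth n =
      (List.range depth.toNat).map
        (fun (k : Nat) => if (k : Int) < max 0 (2 * depth - n) then (k : Int)
                  else 2 * (k : Int) - max 0 (2 * depth - n)) := by
  have hlen : ((PySem.List.pyRange 0 n 1).length : Int) = n := by
    rw [PySem.List.length_pyRange_one]; omega
  rw [get_pretrained_block_indices_py_alt]
  simp only [hlen, PySem.List.foldl_append_singleton_eq_map, List.nil_append,
    PySem.List.pyRange_one 0 depth, List.map_map, sub_zero]
  apply List.map_congr_left
  intro k hk
  rw [List.mem_range] at hk
  have hkd : (k : Int) < depth := by omega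
  simp only [Function.comp_apply, zero_add]
  split
  · rw [getD_pyRange_self n _ (by omega) (by omega)]
  · rw [getD_pyRange_self n _ (by omega) (by omega)]

theorem get_pretrained_block_indices_py_spec : Claim_equal_get_pretrained_block_indices_py := by
  intro depth n _ hpre
  unfold Spec_get_pretrained_block_indices_py
  obtain ⟨hd0, hcase⟩ := hpre
  by_cases hdn : depth ≤ n
  · -- 0 ≤ depth ≤ n
    have hlen : ((PySem.List.pyRange 0 n 1).length : Int) = n := by
      rw [PySem.List.length_pyRange_one]; omega
    rw [alt_eq_map depth n hd0 hdn]
    set s : Int := max 0 (2 * depth - n) with hs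
    have hs0 : 0 ≤ s := by omega
    have hs1 : s ≤ depth := by omega
    rw [get_pretrained_block_indices_py]
    simp only [hlen]
    by_cases h2 : depth * 2 > n
    · -- scarce case: s = 2*depth - n > 0
      rw [if_pos h2]
      have hsval : s = 2 * depth - n := by omega
      rw [pyAWhile_eq _ s.toNat n depth 0 [] (by omega)]
      simp only [List.nil_append, zero_add]
      by_cases h3 : depth - (s : Int) > 0
      · rw [if_pos (by omega : depth - (s.toNat : Int) > 0)]
        rw [PySem.List.foldl_append_singleton_eq_map]
        have hst : ((s.toNat : Int)) = s := by omega
        rw [hst]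
        have hsplit : depth.toNat = s.toNat + (depth - s).toNat := by omega
        rw [hsplit, List.range_add, List.map_append]
        congr 1
        · apply List.map_congr_left
          intro k hk
          rw [List.mem_range] at hk
          rw [getD_pyRange_self n _ (by omega) (by omega)]
          rw [if_pos (by omega)]
        · rw [PySem.List.pyRange_one 0 (depth - s), List.map_map, List.map_map]
          have hcnt : (depth - s - 0).toNat = (depth - s).toNat := by omega
          rw [hcnt]
          apply List.map_congr_left
          intro k hk
          rw [List.mem_range] at hk
          simp only [Function.comp_apply, zero_add]
          rw [getD_pyRange_self n _ (by omega) (by omega)]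
          rw [if_neg (by push_cast; omega)]
          push_cast
          omega
      · -- depth = n: while loop consumed everything
        rw [if_neg (by omega : ¬ depth - (s.toNat : Int) > 0)]
        have hdeq : s = depth := by omega
        have : s.toNat = depth.toNat := by omega
        rw [this]
        apply List.map_congr_left
        intro k hk
        rw [List.mem_range] at hk
        rw [getD_pyRange_self n _ (by omega) (by omega)]
        rw [if_pos (by omega)]
    · -- plentiful case: s = 0
      rw [if_neg h2]
      rw [PySem.List.foldl_append_singleton_eq_map, List.nil_append,
        PySem.List.pyRange_one 0 depth, List.map_map]
      simp only [sub_zero]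
      apply List.map_congr_left
      intro k hk
      rw [List.mem_range] at hk
      simp only [Function.comp_apply, zero_add]
      rw [getD_pyRange_self n _ (by omega) (by omega)]
      rw [if_neg (by omega)]
      omega
  · -- depth = 0 and n < 0: both return []
    have hd : depth = 0 := by tauto
    subst hd
    rw [get_pretrained_block_indices_py, get_pretrained_block_indices_py_alt]
    have h1 : PySem.List.pyRange 0 n 1 = [] := PySem.List.pyRange_one_eq_nil (by omega)
    have h2 : PySem.List.pyRange 0 0 1 = [] := PySem.List.pyRange_one_eq_nil le_rfl
    simp [h1, h2]
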